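-- pv_equiv track=rewrite | github.com/WhangShihEe/subliminal_learning_paper_replication | src/evaluate.py | clean_answers
-- ===== SOURCE A (Python) =====
-- from typing import Dict, List, Any
--
-- def clean_answers(answers: Dict[str, int]) -> Dict[str, int]:
--     """
--     Cleans the answers by converting to lowercase, and merging plural/singular categories
--     """
--     cleaned = {}
--     for answer in answers:
--         # Convert to lowercase
--         clean_answer = answer.lower()
--         # Check if answer is plural, strip s to make singular
--         if clean_answer[-1] == "s":
--             clean_answer = clean_answer[:-1]
--
--         # Sum together frequencies from the same group
--         if clean_answer in cleaned:
--             cleaned[clean_answer] += answers[answer]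
--         else:
--             cleaned[clean_answer] = answers[answer]
--     return cleaned
-- ===== SOURCE B (Python) =====
-- def clean_answers(answers):
--     """Two-phase rewrite: normalize every key eagerly in input order, then build the
--     result by iterating the distinct normalized keys (first-occurrence order) and
--     summing the matching values with one comprehension per key."""
--     norms = []
--     for answer in answers:
--         a = answer.lower()
--         if a[-1] == "s":
--             a = a[:-1]
--         norms.append(a)
--     vals = list(answers.values())
--     seen = list(dict.fromkeys(norms))
--     return {nk: sum(v for n, v in zip(norms, vals) if n == nk) for nk in seen}
-- ===== Notes on version B (the rewrite author's own statement) =====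
-- stated objective: alternative
-- what changed: Replaces A's incremental dict accumulation (membership test then += / = per element) with a two-phase strategy: eagerly normalize all keys in order, dedup them with dict.fromkeys, and build the output with one sum-comprehension per distinct normalized key.
import Mathlib
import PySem

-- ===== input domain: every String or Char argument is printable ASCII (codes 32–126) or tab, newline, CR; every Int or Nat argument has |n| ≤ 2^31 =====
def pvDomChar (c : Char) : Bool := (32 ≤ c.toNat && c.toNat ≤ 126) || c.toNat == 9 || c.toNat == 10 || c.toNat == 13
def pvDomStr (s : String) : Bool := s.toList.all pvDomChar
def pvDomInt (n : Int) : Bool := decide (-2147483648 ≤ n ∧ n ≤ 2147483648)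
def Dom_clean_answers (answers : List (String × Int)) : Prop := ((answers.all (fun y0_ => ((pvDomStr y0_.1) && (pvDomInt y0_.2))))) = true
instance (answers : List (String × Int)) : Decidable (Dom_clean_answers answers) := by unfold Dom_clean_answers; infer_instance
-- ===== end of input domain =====

-- ===== PORT A =====
-- B normalizes all keys up front, dedups them, and sums per distinct key; A accumulates
-- incrementally in a dict. Equal on inputs whose keys are distinct and nonempty (Pre_).
def clean_answers (answers : List (String × Int)) : List (String × Int) :=
  (answers.foldl (fun cleaned p =>
      let ca0 := PySem.Str.lower p.1
      -- if clean_answer[-1] == "s": clean_answer = clean_answer[:-1]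
      let ca := if PySem.Str.pyGet? ca0 (-1) = some 's' then PySem.Str.slice ca0 none (some (-1)) else ca0
      -- answers[answer]: dict lookup = first match (key always present while iterating)
      let v := (answers.lookup p.1).getD 0
      if cleaned.contains ca then cleaned.insert ca (cleaned.getD ca 0 + v)
      else cleaned.insert ca v)
    PySem.Dict.empty).items

-- ===== PORT B =====
-- key.lower() with a trailing 's' stripped (the loop body of Source B's first phase)
def pvNormKey (s : String) : String :=
  let a := PySem.Str.lower s
  if PySem.Str.pyGet? a (-1) = some 's' then PySem.Str.slice a none (some (-1)) else a

def clean_answers_alt (answers : List (String × Int)) : List (String × Int) :=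
  let norms := answers.map (fun p => pvNormKey p.1)
  let vals := answers.map (fun p => p.2)
  let seen := PySem.List.dedup norms
  seen.map (fun nk => (nk, (((norms.zip vals).filter (fun q => q.1 == nk)).map (fun q => q.2)).sum))

-- ===== PRECONDITION & SPEC =====
-- Pre_ excludes (i) empty-string keys, on which A raises IndexError at clean_answer[-1],
-- and (ii) duplicate keys, which the Python dict argument cannot represent (the assoc-list
-- behaviour there would be an artefact of the encoding, not of A).
def Pre_clean_answers (answers : List (String × Int)) : Prop :=
  (answers.map (fun p => p.1)).Nodup ∧ ∀ p ∈ answers, p.1 ≠ ""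
instance (answers : List (String × Int)) : Decidable (Pre_clean_answers answers) := by unfold Pre_clean_answers; infer_instance
def pvWitness_clean_answers : (List (String × Int)) := [("Cats", 2), ("dog", 1), ("cat", 3)]
def Spec_clean_answers (answers : List (String × Int)) (out : List (String × Int)) : Prop := out = clean_answers_alt answers
instance (answers : List (String × Int)) (out : List (String × Int)) : Decidable (Spec_clean_answers answers out) := by unfold Spec_clean_answers; infer_instance

-- ===== CLAIM (what is proved, stated in full; the proofs are below) =====
def Claim_equal_clean_answers : Prop := ∀ (answers : List (String × Int)), Dom_clean_answers answers → Pre_clean_answers answers → Spec_clean_answers answers (clean_answers answers)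

-- ===== LEMMAS AND PROOFS =====

-- first-match lookup of an element's own key, under distinct keys
theorem pv_lookup_self (answers : List (String × Int))
    (hnd : (answers.map (fun p => p.1)).Nodup) :
    ∀ p ∈ answers, (answers.lookup p.1).getD 0 = p.2 := by
  induction answers with
  | nil => intro p hp; simp at hp
  | cons q t ih =>
    simp only [List.map_cons, List.nodup_cons] at hnd
    intro p hp
    rcases List.mem_cons.mp hp with h | h
    · subst h; simp [List.lookup]
    · have hq2 : (p.1 == q.1) = false :=
        beq_eq_false_iff_ne.mpr (fun he => hnd.1 (he ▸ List.mem_map_of_mem h))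
      simp only [List.lookup, hq2]
      exact ih hnd.2 p h

-- getD of the merged insert-accumulate loop
theorem pv_getD_fold (l : List (String × Int)) (d : PySem.Dict String Int) (k : String) :
    (l.foldl (fun d q => d.insert q.1 (d.getD q.1 0 + q.2)) d).getD k 0
      = d.getD k 0 + ((l.filter (fun q => q.1 == k)).map (fun q => q.2)).sum := by
  induction l generalizing d with
  | nil => simp
  | cons q t ih =>
    simp only [List.foldl_cons, List.filter_cons]
    rw [ih]
    by_cases hk : k = q.1
    · subst hk
      simp
      ring
    · have hk' : ¬ (q.1 = k) := fun h => hk h.symm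
      simp [PySem.Dict.getD_insert, hk, hk']

-- items of the accumulate loop from empty = group-by-first-occurrence
theorem pv_fold_items (l : List (String × Int)) :
    (l.foldl (fun d q => d.insert q.1 (d.getD q.1 0 + q.2)) PySem.Dict.empty).items
      = (PySem.List.dedup (l.map (fun p => p.1))).map
          (fun k => (k, ((l.filter (fun q => q.1 == k)).map (fun q => q.2)).sum)) := by
  have hkeys : (l.foldl (fun d q => d.insert q.1 (d.getD q.1 0 + q.2)) PySem.Dict.empty).keys
      = PySem.List.dedup (l.map (fun p => p.1)) := by
    rw [PySem.Dict.keys_foldl_insert_key (key := fun (q : String × Int) => q.1)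
        (f := fun (d : PySem.Dict String Int) (q : String × Int) => d.getD q.1 0 + q.2)]
    simp [PySem.Set.update_nil_left]
  have hnd : (l.foldl (fun d q => d.insert q.1 (d.getD q.1 0 + q.2)) PySem.Dict.empty).keys.Nodup := by
    rw [hkeys]; exact PySem.List.nodup_dedup _
  rw [PySem.Dict.items_eq_map_keys _ hnd 0, hkeys]
  refine List.map_congr_left ?_
  intro k _
  rw [pv_getD_fold]
  simp

-- ===== VERDICT (by name: the statement is the Claim_ definition above) =====
theorem clean_answers_spec : Claim_equal_clean_answers := by
  intro answers _ hpre
  obtain ⟨hnd, _⟩ := hpre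
  unfold Spec_clean_answers clean_answers clean_answers_alt
  have hfold : (answers.foldl (fun cleaned p =>
      let ca0 := PySem.Str.lower p.1
      let ca := if PySem.Str.pyGet? ca0 (-1) = some 's' then PySem.Str.slice ca0 none (some (-1)) else ca0
      let v := (answers.lookup p.1).getD 0
      if cleaned.contains ca then cleaned.insert ca (cleaned.getD ca 0 + v)
      else cleaned.insert ca v) PySem.Dict.empty)
      = answers.foldl (fun d p => d.insert (pvNormKey p.1) (d.getD (pvNormKey p.1) 0 + p.2)) PySem.Dict.empty := by
    apply PySem.List.foldl_congr_mem
    intro acc p hp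
    show (if acc.contains (pvNormKey p.1)
        then acc.insert (pvNormKey p.1) (acc.getD (pvNormKey p.1) 0 + (answers.lookup p.1).getD 0)
        else acc.insert (pvNormKey p.1) ((answers.lookup p.1).getD 0)) = _
    rw [pv_lookup_self answers hnd p hp]
    by_cases hc : acc.contains (pvNormKey p.1) = true
    · simp [hc]
    · have hc' : acc.contains (pvNormKey p.1) = false := by
        simpa using hc
      simp [PySem.Dict.getD_of_not_contains, hc']
  rw [hfold,
    ← List.foldl_map (f := fun p : String × Int => (pvNormKey p.1, p.2))
      (g := fun (d : PySem.Dict String Int) q => d.insert q.1 (d.getD q.1 0 + q.2)),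
    pv_fold_items]
  simp [List.map_map, List.zip_map', Function.comp_def]
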